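-- pv_equiv track=rewrite | github.com/Putraayaka/pulo-sarok-kkn | letters/services.py | extract_text_statistics
-- ===== SOURCE A (Python) =====
-- def calculate_reading_time(content):
--     """Hitung estimasi waktu baca"""
--     words = len(content.split())
--     # Asumsi 200 kata per menit
--     minutes = max(1, words // 200)
--     return minutes
--
-- def extract_text_statistics(content):
--     """Ekstrak statistik teks"""
--     words = len(content.split())
--     characters = len(content)
--     characters_no_spaces = len(content.replace(' ', ''))
--     paragraphs = len([p for p in content.split('\n') if p.strip()])
--
--     return {
--         'words': words,
--         'characters': characters,
--         'characters_no_spaces': characters_no_spaces,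
--         'paragraphs': paragraphs,
--         'reading_time': calculate_reading_time(content)
--     }
-- ===== SOURCE B (Python) =====
-- def extract_text_statistics(content):
--     """Single pass over the characters instead of four library scans."""
--     words = 0
--     no_spaces = 0
--     paragraphs = 0
--     in_word = False
--     line_has_text = False
--     for c in content:
--         if not c.isspace():
--             if not in_word:
--                 words += 1
--             in_word = True
--         else:
--             in_word = False
--         if c != ' ':
--             no_spaces += 1
--         if c == '\n':
--             if line_has_text:
--                 paragraphs += 1
--             line_has_text = False
--         elif not c.isspace():
--             line_has_text = True
--     if line_has_text:
--         paragraphs += 1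
--     return {
--         'words': words,
--         'characters': len(content),
--         'characters_no_spaces': no_spaces,
--         'paragraphs': paragraphs,
--         'reading_time': max(1, words // 200)
--     }
-- ===== Notes on version B (the rewrite author's own statement) =====
-- stated objective: alternative
-- what changed: Replaced the four independent library scans (whitespace split, replace, newline split plus strip filter) with one character-at-a-time state machine maintaining word-run, non-space and paragraph-line counters in a single pass.
import Mathlib
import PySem

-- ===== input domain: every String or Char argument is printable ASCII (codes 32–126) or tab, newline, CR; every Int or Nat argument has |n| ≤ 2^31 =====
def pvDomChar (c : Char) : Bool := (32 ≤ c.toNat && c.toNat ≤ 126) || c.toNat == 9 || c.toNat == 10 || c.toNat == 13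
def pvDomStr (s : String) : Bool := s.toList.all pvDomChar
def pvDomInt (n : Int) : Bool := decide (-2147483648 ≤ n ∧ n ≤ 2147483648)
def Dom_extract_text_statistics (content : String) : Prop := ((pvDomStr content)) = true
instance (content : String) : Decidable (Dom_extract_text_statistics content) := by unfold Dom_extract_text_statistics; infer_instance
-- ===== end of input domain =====

-- B replaces A's four independent library scans with one single-pass character state machine; same O(n) cost, different decomposition.

-- ===== PORT A =====
def calculate_reading_time (content : String) : Int :=
  let words := PySem.List.len (PySem.Chars.split₀ content.toList)
  max 1 (PySem.Int.floordiv words 200)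

def extract_text_statistics (content : String) : List (String × Int) :=
  let words := PySem.List.len (PySem.Chars.split₀ content.toList)
  let characters := PySem.Str.len content
  let characters_no_spaces := PySem.List.len (PySem.Chars.replace content.toList [' '] [])
  let paragraphs := PySem.List.len ((PySem.Chars.splitOn content.toList ['\n']).filter
    (fun p => !(PySem.Chars.strip p).isEmpty))
  [("words", words), ("characters", characters),
   ("characters_no_spaces", characters_no_spaces), ("paragraphs", paragraphs),
   ("reading_time", calculate_reading_time content)]

-- ===== PORT B =====
-- the for-loop of Source B: state (words, no_spaces, paragraphs, in_word, line_has_text)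
def etsLoop : List Char → Int × Int × Int × Bool × Bool → Int × Int × Int × Bool × Bool
  | [], st => st
  | c :: rest, (w, ns, p, inW, lt) =>
    let w' := if !PySem.Chars.isspace c then (if !inW then w + 1 else w) else w
    let inW' := !PySem.Chars.isspace c
    let ns' := if c ≠ ' ' then ns + 1 else ns
    let plt : Int × Bool :=
      if c = '\n' then (if lt then p + 1 else p, false)
      else if !PySem.Chars.isspace c then (p, true) else (p, lt)
    etsLoop rest (w', ns', plt.1, inW', plt.2)

def extract_text_statistics_alt (content : String) : List (String × Int) :=
  let st := etsLoop content.toList (0, 0, 0, false, false)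
  let words := st.1
  let no_spaces := st.2.1
  let paragraphs := if st.2.2.2.2 then st.2.2.1 + 1 else st.2.2.1
  [("words", words), ("characters", PySem.Str.len content),
   ("characters_no_spaces", no_spaces), ("paragraphs", paragraphs),
   ("reading_time", max 1 (PySem.Int.floordiv words 200))]

-- ===== PRECONDITION & SPEC =====
def Spec_extract_text_statistics (content : String) (out : List (String × Int)) : Prop := out = extract_text_statistics_alt content
instance (content : String) (out : List (String × Int)) : Decidable (Spec_extract_text_statistics content out) := by unfold Spec_extract_text_statistics; infer_instance

-- ===== CLAIM (what is proved, stated in full; the proofs are below) =====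
def Claim_equal_extract_text_statistics : Prop := ∀ (content : String), Dom_extract_text_statistics content → Spec_extract_text_statistics content (extract_text_statistics content)

-- ===== LEMMAS AND PROOFS =====

-- closed forms for the four counters of B's state machine
def wcnt : List Char → Bool → Nat
  | [], _ => 0
  | c :: r, inW =>
    if PySem.Chars.isspace c then wcnt r false
    else (if inW then 0 else 1) + wcnt r true

def pcnt : List Char → Bool → Nat
  | [], _ => 0
  | c :: r, lt =>
    if c = '\n' then (if lt then 1 else 0) + pcnt r false
    else if PySem.Chars.isspace c then pcnt r lt
    else pcnt r true

def fLt : List Char → Bool → Bool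
  | [], lt => lt
  | c :: r, lt =>
    if c = '\n' then fLt r false
    else if PySem.Chars.isspace c then fLt r lt
    else fLt r true

def fInW : List Char → Bool → Bool
  | [], inW => inW
  | c :: r, _ => fInW r (!PySem.Chars.isspace c)

def hasTx (p : List Char) : Bool := p.any (fun c => !PySem.Chars.isspace c)

theorem hasTx_nil : hasTx [] = false := rfl

-- the single induction characterising B's whole loop state
theorem etsLoop_eq (cs : List Char) : ∀ (w ns p : Int) (inW lt : Bool),
    etsLoop cs (w, ns, p, inW, lt) =
      (w + (wcnt cs inW : Int), ns + (cs.countP (fun c => c ≠ ' ') : Int),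
       p + (pcnt cs lt : Int), fInW cs inW, fLt cs lt) := by
  induction cs with
  | nil => intro w ns p inW lt; simp [etsLoop, wcnt, pcnt, fLt, fInW]
  | cons c r ih =>
    intro w ns p inW lt
    simp only [etsLoop, wcnt, pcnt, fLt, fInW, List.countP_cons]
    by_cases hn : c = '\n'
    · subst hn
      simp only [show PySem.Chars.isspace '\n' = true from by decide, if_true, if_false,
        Bool.not_true, Bool.false_eq_true, ih, reduceIte, decide_eq_true_eq]
      cases lt <;> simp <;> push_cast <;> (try and_intros) <;> omega
    · by_cases hs : PySem.Chars.isspace c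
      · simp only [hs, hn, if_true, if_false, Bool.not_true, ih, ite_false, Bool.false_eq_true]
        by_cases hcs : c = ' ' <;> cases inW <;> simp [hcs] <;> push_cast <;>
          (try and_intros) <;> omega
      · have hcs : ¬ (c = ' ') := by rintro rfl; exact hs (by decide)
        simp only [hs, hn, hcs, Bool.not_false, if_true, if_false, ite_false, ite_true, ih,
          reduceIte, Bool.true_eq_false]
        cases inW <;> simp [hcs] <;> push_cast <;> (try and_intros) <;> omega

-- A's words: the length of str.split() is the word-run count
theorem split₀_go_length (cs : List Char) : ∀ (cur : List Char) (acc : List (List Char)),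
    (PySem.Chars.split₀.go cs cur acc).length =
      acc.length + (if cur.isEmpty then 0 else 1) + wcnt cs (!cur.isEmpty) := by
  induction cs with
  | nil => intro cur acc; cases cur <;> simp [PySem.Chars.split₀.go, wcnt]
  | cons c r ih =>
    intro cur acc
    by_cases hs : PySem.Chars.isspace c
    · cases cur with
      | nil => simp [PySem.Chars.split₀.go, hs, ih, wcnt] <;> omega
      | cons x xs => simp [PySem.Chars.split₀.go, hs, ih, wcnt] <;> omega
    · cases cur with
      | nil => simp [PySem.Chars.split₀.go, hs, ih, wcnt] <;> omega
      | cons x xs => simp [PySem.Chars.split₀.go, hs, ih, wcnt] <;> omega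

theorem split₀_length (cs : List Char) :
    (PySem.Chars.split₀ cs).length = wcnt cs false := by
  simp [PySem.Chars.split₀, split₀_go_length]

-- A's characters_no_spaces: the length of content.replace(' ', '') is the non-space count
theorem replace_go_length : ∀ (fuel : Nat) (l acc : List Char), l.length ≤ fuel →
    (PySem.Chars.replace.go [' '] [] fuel l acc).length =
      acc.length + l.countP (fun c => c ≠ ' ') := by
  intro fuel
  induction fuel with
  | zero =>
    intro l acc h
    have : l = [] := by cases l <;> simp_all
    subst this; simp [PySem.Chars.replace.go]
  | succ n ih =>
    intro l acc h
    cases l with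
    | nil => simp [PySem.Chars.replace.go]
    | cons c t =>
      by_cases hc : c = ' '
      · subst hc
        simp [PySem.Chars.replace.go, List.isPrefixOf, ih t acc (by simpa using h),
          List.countP_cons]
      · simp [PySem.Chars.replace.go, List.isPrefixOf, hc, Ne.symm hc,
          ih t (c :: acc) (by simpa using Nat.le_of_succ_le_succ h), List.countP_cons]
        omega

theorem replace_length (cs : List Char) :
    (PySem.Chars.replace cs [' '] []).length = cs.countP (fun c => c ≠ ' ') := by
  simp [PySem.Chars.replace, replace_go_length cs.length cs [] le_rfl]

-- A's paragraph predicate: p.strip() is non-empty iff p has a non-whitespace char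
theorem all_dropWhile_eq (q : Char → Bool) (l : List Char) :
    (List.dropWhile q l).all q = l.all q := by
  induction l with
  | nil => simp
  | cons c r ih => by_cases h : q c <;> simp [h, ih]

theorem strip_isEmpty (p : List Char) :
    (!(PySem.Chars.strip p).isEmpty) = hasTx p := by
  simp only [PySem.Chars.strip, PySem.Chars.rstrip, PySem.Chars.lstrip, hasTx]
  rcases h : p.any (fun c => !PySem.Chars.isspace c) with _ | _
  · have h1 : List.dropWhile PySem.Chars.isspace p = [] := by
      rw [List.dropWhile_eq_nil_iff]
      intro x hx
      have := List.any_eq_false.mp h x hx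
      simpa using this
    simp [h1]
  · have h2 : (List.dropWhile PySem.Chars.isspace p).all PySem.Chars.isspace = false := by
      rw [all_dropWhile_eq]
      rcases List.any_eq_true.mp h with ⟨x, hx, hxs⟩
      rw [List.all_eq_false]
      exact ⟨x, hx, by simpa using hxs⟩
    have h3 : List.dropWhile PySem.Chars.isspace
        ((List.dropWhile PySem.Chars.isspace p).reverse) ≠ [] := by
      intro hnil
      rw [List.dropWhile_eq_nil_iff] at hnil
      rcases List.all_eq_false.mp h2 with ⟨x, hx, hxs⟩
      exact hxs (hnil x (List.mem_reverse.mpr hx))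
    simp [h3]

theorem strip_pred :
    (fun p => !(PySem.Chars.strip p).isEmpty) = hasTx := funext strip_isEmpty

-- A's paragraphs: content.split('\n') filtered by strip equals the line state machine
theorem splitOn_go_par : ∀ (fuel : Nat) (l cur : List Char) (acc : List (List Char)),
    l.length < fuel →
    ((PySem.Chars.splitOn.go ['\n'] fuel l cur acc).filter hasTx).length =
      (acc.filter hasTx).length + pcnt l (hasTx cur) +
        (if fLt l (hasTx cur) then 1 else 0) := by
  intro fuel
  induction fuel with
  | zero => intro l cur acc h; omega
  | succ n ih =>
    intro l cur acc h
    cases l with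
    | nil =>
      simp only [PySem.Chars.splitOn.go, List.filter_reverse, List.length_reverse, pcnt, fLt]
      rw [List.filter_cons]
      have : hasTx cur.reverse = hasTx cur := by simp [hasTx]
      by_cases hx : hasTx cur <;> simp [this, hx, pcnt, fLt]
    | cons c rest =>
      by_cases hn : c = '\n'
      · subst hn
        rw [show PySem.Chars.splitOn.go ['\n'] (n+1) ('\n'::rest) cur acc
              = PySem.Chars.splitOn.go ['\n'] n rest [] (cur.reverse :: acc) by
            simp [PySem.Chars.splitOn.go, List.isPrefixOf]]
        rw [ih rest [] (cur.reverse :: acc) (by simpa using h)]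
        rw [List.filter_cons]
        have hrev : hasTx cur.reverse = hasTx cur := by simp [hasTx]
        rw [hrev]
        by_cases hx : hasTx cur <;> simp only [hx, pcnt, fLt, if_true, if_false, hasTx_nil,
          Bool.false_eq_true, List.length_cons, reduceIte] <;> split_ifs <;> omega
      · rw [show PySem.Chars.splitOn.go ['\n'] (n+1) (c::rest) cur acc
              = PySem.Chars.splitOn.go ['\n'] n rest (c :: cur) acc by
            simp [PySem.Chars.splitOn.go, List.isPrefixOf, hn, Ne.symm hn]]
        rw [ih rest (c :: cur) acc (by simpa using h)]
        have hcons : hasTx (c :: cur) = (!PySem.Chars.isspace c || hasTx cur) := by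
          simp [hasTx]
        by_cases hs : PySem.Chars.isspace c <;>
          simp [pcnt, fLt, hn, hs, hcons] <;> omega

theorem splitOn_par (cs : List Char) :
    ((PySem.Chars.splitOn cs ['\n']).filter (fun p => !(PySem.Chars.strip p).isEmpty)).length =
      pcnt cs false + (if fLt cs false then 1 else 0) := by
  rw [strip_pred, PySem.Chars.splitOn]
  simpa [hasTx] using splitOn_go_par (cs.length + 1) cs [] [] (by omega)

-- ===== VERDICT (by name: the statement is the Claim_ definition above) =====
theorem extract_text_statistics_spec : Claim_equal_extract_text_statistics := by
  intro content _
  unfold Spec_extract_text_statistics extract_text_statistics extract_text_statistics_alt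
    calculate_reading_time
  simp only [etsLoop_eq, split₀_length, replace_length, splitOn_par,
    PySem.List.len_eq, zero_add]
  norm_num
  split <;> push_cast <;> omega
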